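-- pv_equiv track=rewrite | github.com/KIST-delight-robotics/DrumRobot2 | phil_robot/pipeline/motion_resolver.py | _replace_relative_step_sequence
-- ===== SOURCE A (Python) =====
-- def _replace_relative_step_sequence(op_cmds, step_cmds):
--     updated_commands = []
--     inserted = False
--
--     for command in op_cmds:
--         if command.startswith(("move:", "wait:", "look:", "gesture:")):
--             if not inserted:
--                 updated_commands.extend(step_cmds)
--                 inserted = True
--             continue
--         updated_commands.append(command)
--
--     if not inserted:
--         updated_commands.extend(step_cmds)
--
--     return updated_commands
-- ===== SOURCE B (Python) =====
-- from itertools import takewhile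
--
-- _REL_PREFIXES = ("move:", "wait:", "look:", "gesture:")
--
-- def _is_rel(cmd):
--     return cmd.startswith(_REL_PREFIXES)
--
-- def _replace_relative_step_sequence(op_cmds, step_cmds):
--     prefix = list(takewhile(lambda c: not _is_rel(c), op_cmds))
--     rest = op_cmds[len(prefix):]
--     filtered_tail = [c for c in rest if not _is_rel(c)]
--     return prefix + list(step_cmds) + filtered_tail
-- ===== Notes on version B (the rewrite author's own statement) =====
-- stated objective: idiomatic
-- what changed: Replaces A's single stateful loop with an inserted flag by an explicit partition: takewhile prefix of non-relative commands, then step_cmds, then a filtered tail comprehension.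
import Mathlib
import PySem

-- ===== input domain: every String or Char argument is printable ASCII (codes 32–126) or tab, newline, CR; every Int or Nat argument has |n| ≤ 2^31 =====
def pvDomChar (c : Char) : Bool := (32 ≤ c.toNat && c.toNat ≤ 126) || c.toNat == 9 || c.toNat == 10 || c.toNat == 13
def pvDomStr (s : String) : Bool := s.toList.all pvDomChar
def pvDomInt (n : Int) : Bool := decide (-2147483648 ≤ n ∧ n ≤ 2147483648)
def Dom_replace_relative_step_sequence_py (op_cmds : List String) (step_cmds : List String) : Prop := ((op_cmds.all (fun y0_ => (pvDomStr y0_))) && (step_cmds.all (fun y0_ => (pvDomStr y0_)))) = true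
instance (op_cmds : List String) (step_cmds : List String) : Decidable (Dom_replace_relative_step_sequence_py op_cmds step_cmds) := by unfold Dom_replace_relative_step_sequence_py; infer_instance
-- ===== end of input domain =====

-- B replaces A's single stateful loop (inserted flag) by an explicit partition
-- prefix ++ step_cmds ++ filtered tail; objective: idiomatic, same cost.


-- ===== PORT A =====
-- command.startswith(("move:", "wait:", "look:", "gesture:"))
def pvIsRel (c : String) : Bool :=
  PySem.Str.startswith c "move:" || PySem.Str.startswith c "wait:" ||
  PySem.Str.startswith c "look:" || PySem.Str.startswith c "gesture:"

def replace_relative_step_sequence_py (op_cmds : List String) (step_cmds : List String) : List String :=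
  -- loop: state = (updated_commands, inserted)
  let r := op_cmds.foldl (fun s command =>
    if pvIsRel command then
      if !s.2 then (s.1 ++ step_cmds, true) else s
    else (s.1 ++ [command], s.2)) ([], false)
  if !r.2 then r.1 ++ step_cmds else r.1

-- ===== PORT B =====
def replace_relative_step_sequence_py_alt (op_cmds : List String) (step_cmds : List String) : List String :=
  let pre := op_cmds.takeWhile (fun c => !pvIsRel c)
  let rest := op_cmds.drop pre.length
  let filtered_tail := rest.filter (fun c => !pvIsRel c)
  pre ++ step_cmds ++ filtered_tail

-- ===== PRECONDITION & SPEC =====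
def Spec_replace_relative_step_sequence_py (op_cmds : List String) (step_cmds : List String) (out : List String) : Prop := out = replace_relative_step_sequence_py_alt op_cmds step_cmds
instance (op_cmds : List String) (step_cmds : List String) (out : List String) : Decidable (Spec_replace_relative_step_sequence_py op_cmds step_cmds out) := by unfold Spec_replace_relative_step_sequence_py; infer_instance

-- ===== CLAIM (what is proved, stated in full; the proofs are below) =====
def Claim_equal_replace_relative_step_sequence_py : Prop := ∀ (op_cmds : List String) (step_cmds : List String), Dom_replace_relative_step_sequence_py op_cmds step_cmds → Spec_replace_relative_step_sequence_py op_cmds step_cmds (replace_relative_step_sequence_py op_cmds step_cmds)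

-- ===== LEMMAS AND PROOFS =====

-- After insertion the loop just filters the remaining commands onto the accumulator.
theorem pv_foldl_true (step_cmds : List String) :
    ∀ (cs : List String) (acc : List String),
      cs.foldl (fun s command =>
        if pvIsRel command then
          if !s.2 then (s.1 ++ step_cmds, true) else s
        else (s.1 ++ [command], s.2)) (acc, true)
      = (acc ++ cs.filter (fun c => !pvIsRel c), true) := by
  intro cs
  induction cs with
  | nil => intro acc; simp
  | cons c cs ih =>
    intro acc
    rw [List.foldl_cons]
    by_cases h : pvIsRel c = true
    · rw [if_pos h, if_neg (by simp)]
      rw [ih, List.filter_cons]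
      simp [h]
    · rw [if_neg h]
      rw [ih, List.filter_cons]
      simp [h]

-- Before insertion the loop realises prefix ++ step_cmds ++ filtered tail.
theorem pv_foldl_false (step_cmds : List String) :
    ∀ (cs : List String) (acc : List String),
      (let r := cs.foldl (fun s command =>
          if pvIsRel command then
            if !s.2 then (s.1 ++ step_cmds, true) else s
          else (s.1 ++ [command], s.2)) (acc, false)
       if !r.2 then r.1 ++ step_cmds else r.1)
      = acc ++ (cs.takeWhile (fun c => !pvIsRel c)) ++ step_cmds ++
        ((cs.drop (cs.takeWhile (fun c => !pvIsRel c)).length).filter (fun c => !pvIsRel c)) := by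
  intro cs
  induction cs with
  | nil => intro acc; simp
  | cons c cs ih =>
    intro acc
    by_cases h : pvIsRel c = true
    · simp only [List.foldl_cons, h, Bool.not_false, if_pos]
      rw [pv_foldl_true]
      simp [h, List.filter_cons]
    · simp only [List.foldl_cons, if_neg h]
      rw [ih]
      simp [h]

-- ===== VERDICT (by name: the statement is the Claim_ definition above) =====
theorem replace_relative_step_sequence_py_spec : Claim_equal_replace_relative_step_sequence_py := by
  intro op_cmds step_cmds _
  unfold Spec_replace_relative_step_sequence_py
  unfold replace_relative_step_sequence_py replace_relative_step_sequence_py_alt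
  simpa using pv_foldl_false step_cmds op_cmds []
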